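-- pv_equiv track=rewrite | github.com/JDSB05/FocusPA | app/controllers/rag_controller.py | delete_think_stream
-- ===== SOURCE A (Python) =====
-- def delete_think_stream(chunks):
--     """
--     Recebe um iterável/gerador de chunks e devolve-os removendo <think>...</think>.
--     Suporta tags partidas entre chunks.
--     """
--     inside_think = False
--     buffer = ""
--
--     for chunk in chunks:
--         if not chunk:
--             continue
--
--         i = 0
--         while i < len(chunk):
--             if not inside_think:
--                 start_tag = chunk.find("<think>", i)
--                 if start_tag == -1:
--                     buffer += chunk[i:]
--                     break
--                 else:
--                     buffer += chunk[i:start_tag]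
--                     inside_think = True
--                     i = start_tag + len("<think>")
--             else:
--                 end_tag = chunk.find("</think>", i)
--                 if end_tag == -1:
--                     # ainda dentro de <think>, descarta até vir o fecho
--                     break
--                 else:
--                     inside_think = False
--                     i = end_tag + len("</think>")
--
--         if buffer:
--             yield buffer
--             buffer = ""
--
--     # flush final se sobrou texto
--     if buffer:
--         yield buffer
-- ===== SOURCE B (Python) =====
-- def delete_think_stream(chunks):
--     """Character-level state machine: walk each chunk once, matching the open/close
--     tags in place with str.startswith instead of find-and-slice jumps."""
--     inside = False
--     for chunk in chunks:
--         out = []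
--         k = 0
--         n = len(chunk)
--         while k < n:
--             if inside:
--                 if chunk.startswith('</think>', k):
--                     inside = False
--                     k += 8
--                 else:
--                     k += 1
--             elif chunk.startswith('<think>', k):
--                 inside = True
--                 k += 7
--             else:
--                 out.append(chunk[k])
--                 k += 1
--         if out:
--             yield ''.join(out)
-- ===== Notes on version B (the rewrite author's own statement) =====
-- stated objective: alternative
-- what changed: A scans each chunk by repeated str.find jumps and slice concatenation; B walks each chunk once as a per-character state machine that matches the open/close tags in place with str.startswith and collects kept characters.
import Mathlib
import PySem

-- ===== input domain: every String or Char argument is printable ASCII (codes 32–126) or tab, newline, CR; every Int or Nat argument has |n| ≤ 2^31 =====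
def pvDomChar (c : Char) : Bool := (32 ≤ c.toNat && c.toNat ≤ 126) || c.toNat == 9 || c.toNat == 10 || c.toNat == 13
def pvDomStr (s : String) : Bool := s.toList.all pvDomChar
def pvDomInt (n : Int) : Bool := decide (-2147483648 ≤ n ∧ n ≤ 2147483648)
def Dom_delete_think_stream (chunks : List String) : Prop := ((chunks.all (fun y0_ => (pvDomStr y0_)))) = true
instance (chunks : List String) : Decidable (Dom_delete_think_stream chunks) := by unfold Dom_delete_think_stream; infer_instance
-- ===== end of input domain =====

-- B replaces A's find-and-slice index jumps by a single per-character state machine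
-- (startswith at each position); same outputs, a different mechanism (objective: alternative).
-- Note: A is a generator; the equivalence is about the list of yielded values.

-- "<think>" and "</think>" as char lists (shared literals of both ports)
def pvOpen : List Char := ['<', 't', 'h', 'i', 'n', 'k', '>']
def pvClose : List Char := ['<', '/', 't', 'h', 'i', 'n', 'k', '>']

-- ===== PORT A =====
-- inner `while i < len(chunk)` of A: state (i, inside_think, buffer)
def pvLoopA (s : List Char) (i : Nat) (inside : Bool) (buf : List Char) : List Char × Bool :=
  if h : i < s.length then
    if inside then
      -- end_tag = chunk.find("</think>", i)
      let e := PySem.Chars.findFrom s pvClose (i : Int)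
      if he : e = -1 then (buf, inside)                       -- break (still inside)
      else pvLoopA s (e.toNat + 8) false buf                  -- i = end_tag + len("</think>")
    else
      -- start_tag = chunk.find("<think>", i)
      let st := PySem.Chars.findFrom s pvOpen (i : Int)
      if hst : st = -1 then
        (buf ++ PySem.Chars.slice s (some (i : Int)) none, inside)   -- buffer += chunk[i:]; break
      else
        pvLoopA s (st.toNat + 7) true (buf ++ PySem.Chars.slice s (some (i : Int)) (some st))
  else (buf, inside)
termination_by s.length - i
decreasing_by
  · have h1 := (PySem.Chars.findFrom_natCast_spec s pvClose i h.le he).1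
    omega
  · have h1 := (PySem.Chars.findFrom_natCast_spec s pvOpen i h.le hst).1
    omega

-- one chunk of A's `for` loop: state (yielded so far, inside_think, buffer)
def pvStepA (st : List String × Bool × List Char) (chunk : String) : List String × Bool × List Char :=
  if chunk.toList = [] then st                                -- if not chunk: continue
  else
    let r := pvLoopA chunk.toList 0 st.2.1 st.2.2
    if r.1 = [] then (st.1, r.2, r.1)
    else (st.1 ++ [String.ofList r.1], r.2, [])                   -- if buffer: yield buffer; buffer = ""

def delete_think_stream (chunks : List String) : List String :=
  let st := chunks.foldl pvStepA ([], false, [])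
  st.1 ++ (if st.2.2 = [] then [] else [String.ofList st.2.2])    -- flush final

-- ===== PORT B =====
-- B's `while k < n` character automaton; chunk.startswith(tag, k) is ported by hand as
-- tag.isPrefixOf (s.drop k), exact for 0 ≤ k (Python startswith with a start offset).
def pvLoopB (s : List Char) (k : Nat) (inside : Bool) (out : List Char) : List Char × Bool :=
  if h : k < s.length then
    if inside then
      if pvClose.isPrefixOf (s.drop k) then pvLoopB s (k + 8) false out
      else pvLoopB s (k + 1) inside out
    else if pvOpen.isPrefixOf (s.drop k) then pvLoopB s (k + 7) true out
    else pvLoopB s (k + 1) inside (out ++ [s[k]])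
  else (out, inside)
termination_by s.length - k

-- one chunk of B's `for` loop: state (yielded so far, inside)
def pvStepB (st : List String × Bool) (chunk : String) : List String × Bool :=
  let r := pvLoopB chunk.toList 0 st.2 []
  (st.1 ++ (if r.1 = [] then [] else [String.ofList r.1]), r.2)   -- if out: yield ''.join(out)

def delete_think_stream_alt (chunks : List String) : List String :=
  (chunks.foldl pvStepB ([], false)).1

-- ===== PRECONDITION & SPEC =====
def Spec_delete_think_stream (chunks : List String) (out : List String) : Prop := out = delete_think_stream_alt chunks
instance (chunks : List String) (out : List String) : Decidable (Spec_delete_think_stream chunks out) := by unfold Spec_delete_think_stream; infer_instance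

-- ===== CLAIM (what is proved, stated in full; the proofs are below) =====
def Claim_equal_delete_think_stream : Prop := ∀ (chunks : List String), Dom_delete_think_stream chunks → Spec_delete_think_stream chunks (delete_think_stream chunks)

-- ===== LEMMAS AND PROOFS =====

-- infix in a later suffix is infix in an earlier one
lemma pv_infix_drop_succ {t : List Char} {s : List Char} {i : Nat}
    (h : t <:+: s.drop (i + 1)) : t <:+: s.drop i := by
  have hsuf : s.drop (i + 1) <:+ s.drop i := by
    have h2 := List.drop_suffix 1 (s.drop i)
    simpa [List.drop_drop, Nat.add_comm] using h2
  exact h.trans hsuf.isInfix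

-- B while inside, no "</think>" anywhere ahead: discards the rest
lemma pvB_inside_none : ∀ (n : Nat) (s : List Char) (i : Nat) (buf : List Char),
    s.length - i ≤ n → ¬ pvClose <:+: s.drop i → pvLoopB s i true buf = (buf, true) := by
  intro n
  induction n with
  | zero =>
    intro s i buf hn _
    rw [pvLoopB, dif_neg (by omega)]
  | succ n ih =>
    intro s i buf hn hno
    by_cases hi : i < s.length
    · rw [pvLoopB, dif_pos hi, if_pos rfl]
      have hpre : ¬ pvClose.isPrefixOf (s.drop i) = true := by
        intro hp
        exact hno (List.isPrefixOf_iff_prefix.mp hp).isInfix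
      rw [if_neg hpre]
      exact ih s (i + 1) buf (by omega) (fun h => hno (pv_infix_drop_succ h))
    · rw [pvLoopB, dif_neg hi]

-- B while outside, no "<think>" anywhere ahead: copies the rest
lemma pvB_outside_none : ∀ (n : Nat) (s : List Char) (i : Nat) (buf : List Char),
    s.length - i ≤ n → ¬ pvOpen <:+: s.drop i → pvLoopB s i false buf = (buf ++ s.drop i, false) := by
  intro n
  induction n with
  | zero =>
    intro s i buf hn _
    rw [pvLoopB, dif_neg (by omega), List.drop_eq_nil_of_le (by omega), List.append_nil]
  | succ n ih =>
    intro s i buf hn hno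
    by_cases hi : i < s.length
    · rw [pvLoopB, dif_pos hi, if_neg (Bool.false_ne_true)]
      have hpre : ¬ pvOpen.isPrefixOf (s.drop i) = true := by
        intro hp
        exact hno (List.isPrefixOf_iff_prefix.mp hp).isInfix
      rw [if_neg hpre]
      rw [ih s (i + 1) (buf ++ [s[i]]) (by omega) (fun h => hno (pv_infix_drop_succ h))]
      rw [List.drop_eq_getElem_cons hi, List.append_assoc]
      rfl
    · rw [pvLoopB, dif_neg hi, List.drop_eq_nil_of_le (by omega), List.append_nil]

-- B while inside: skip forward to the first "</think>" occurrence
lemma pvB_inside_skip : ∀ (n : Nat) (s : List Char) (i m : Nat) (buf : List Char),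
    m - i ≤ n → i ≤ m → m ≤ s.length →
    (∀ j, i ≤ j → j < m → ¬ pvClose <+: s.drop j) →
    pvLoopB s i true buf = pvLoopB s m true buf := by
  intro n
  induction n with
  | zero =>
    intro s i m buf hn him _ _
    have : i = m := by omega
    rw [this]
  | succ n ih =>
    intro s i m buf hn him hm hnone
    by_cases heq : i = m
    · rw [heq]
    · have hi : i < s.length := by omega
      rw [pvLoopB, dif_pos hi, if_pos rfl]
      have hpre : ¬ pvClose.isPrefixOf (s.drop i) = true := by
        intro hp
        exact hnone i le_rfl (by omega) (List.isPrefixOf_iff_prefix.mp hp)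
      rw [if_neg hpre]
      exact ih s (i + 1) m buf (by omega) (by omega) hm (fun j h1 h2 => hnone j (by omega) h2)

-- B while outside: skip forward to the first "<think>" occurrence, copying chars
lemma pvB_outside_skip : ∀ (n : Nat) (s : List Char) (i m : Nat) (buf : List Char),
    m - i ≤ n → i ≤ m → m ≤ s.length →
    (∀ j, i ≤ j → j < m → ¬ pvOpen <+: s.drop j) →
    pvLoopB s i false buf = pvLoopB s m false (buf ++ List.take (m - i) (List.drop i s)) := by
  intro n
  induction n with
  | zero =>
    intro s i m buf hn him _ _
    have : i = m := by omega
    simp [this]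
  | succ n ih =>
    intro s i m buf hn him hm hnone
    by_cases heq : i = m
    · simp [heq]
    · have hi : i < s.length := by omega
      rw [pvLoopB, dif_pos hi, if_neg (Bool.false_ne_true)]
      have hpre : ¬ pvOpen.isPrefixOf (s.drop i) = true := by
        intro hp
        exact hnone i le_rfl (by omega) (List.isPrefixOf_iff_prefix.mp hp)
      rw [if_neg hpre]
      rw [ih s (i + 1) m (buf ++ [s[i]]) (by omega) (by omega) hm (fun j h1 h2 => hnone j (by omega) h2)]
      congr 1
      rw [List.append_assoc, List.drop_eq_getElem_cons hi]
      have : m - i = (m - (i + 1)) + 1 := by omega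
      rw [this, List.take_succ_cons]
      rfl

-- the core: A's find-and-jump loop equals B's character automaton
lemma pv_loop_eq : ∀ (n : Nat) (s : List Char) (i : Nat) (inside : Bool) (buf : List Char),
    s.length - i ≤ n → pvLoopA s i inside buf = pvLoopB s i inside buf := by
  intro n
  induction n with
  | zero =>
    intro s i inside buf hn
    rw [pvLoopA, dif_neg (by omega), pvLoopB, dif_neg (by omega)]
  | succ n ih =>
    intro s i inside buf hn
    by_cases hi : i < s.length
    · cases inside with
      | true =>
        rw [pvLoopA, dif_pos hi, if_pos rfl]
        by_cases he : PySem.Chars.findFrom s pvClose (i : Int) = -1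
        · rw [dif_pos he]
          have hno : ¬ pvClose <:+: s.drop i :=
            (PySem.Chars.findFrom_natCast_eq_neg_one_iff s pvClose i hi.le).mp he
          rw [pvB_inside_none (s.length - i) s i buf le_rfl hno]
        · rw [dif_neg he]
          obtain ⟨h1, h2, h3⟩ := PySem.Chars.findFrom_natCast_spec s pvClose i hi.le he
          set e := PySem.Chars.findFrom s pvClose (i : Int) with hedef
          have hie : i ≤ e.toNat := by omega
          have hlen : e.toNat + 8 ≤ s.length := by
            have := h2.length_le
            simp only [List.length_drop] at this
            have h8 : pvClose.length = 8 := by decide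
            omega
          have hstep : pvLoopB s e.toNat true buf = pvLoopB s (e.toNat + 8) false buf := by
            rw [pvLoopB, dif_pos (by omega : e.toNat < s.length), if_pos rfl,
                if_pos (List.isPrefixOf_iff_prefix.mpr h2)]
          rw [ih s (e.toNat + 8) false buf (by omega)]
          rw [pvB_inside_skip (e.toNat - i) s i e.toNat buf le_rfl hie (by omega)
                (fun j hj1 hj2 => h3 j hj1 hj2)]
          exact hstep.symm
      | false =>
        rw [pvLoopA, dif_pos hi, if_neg (Bool.false_ne_true)]
        by_cases hst : PySem.Chars.findFrom s pvOpen (i : Int) = -1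
        · rw [dif_pos hst]
          have hno : ¬ pvOpen <:+: s.drop i :=
            (PySem.Chars.findFrom_natCast_eq_neg_one_iff s pvOpen i hi.le).mp hst
          rw [pvB_outside_none (s.length - i) s i buf le_rfl hno]
          rw [PySem.Chars.slice_eq_listSlice, PySem.List.slice_from_natCast]
        · rw [dif_neg hst]
          obtain ⟨h1, h2, h3⟩ := PySem.Chars.findFrom_natCast_spec s pvOpen i hi.le hst
          set st := PySem.Chars.findFrom s pvOpen (i : Int) with hstdef
          have hie : i ≤ st.toNat := by omega
          have hlen : st.toNat + 7 ≤ s.length := by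
            have := h2.length_le
            simp only [List.length_drop] at this
            have h7 : pvOpen.length = 7 := by decide
            omega
          rw [ih s (st.toNat + 7) true _ (by omega)]
          have hslice : PySem.Chars.slice s (some (i : Int)) (some st)
              = List.take (st.toNat - i) (List.drop i s) := by
            rw [PySem.Chars.slice_eq_listSlice]
            rw [show st = ((st.toNat : Nat) : Int) by omega]
            exact PySem.List.slice_natCast s i st.toNat
          rw [hslice]
          have hstep : pvLoopB s st.toNat false (buf ++ List.take (st.toNat - i) (List.drop i s))
              = pvLoopB s (st.toNat + 7) true (buf ++ List.take (st.toNat - i) (List.drop i s)) := by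
            rw [pvLoopB, dif_pos (by omega : st.toNat < s.length), if_neg (Bool.false_ne_true),
                if_pos (List.isPrefixOf_iff_prefix.mpr h2)]
          rw [pvB_outside_skip (st.toNat - i) s i st.toNat buf le_rfl hie (by omega)
                (fun j hj1 hj2 => h3 j hj1 hj2)]
          exact hstep.symm
    · rw [pvLoopA, dif_neg hi, pvLoopB, dif_neg hi]

-- the chunk folds agree (A's buffer is empty at every chunk boundary)
lemma pv_fold_eq : ∀ (chunks : List String) (acc : List String) (inside : Bool),
    chunks.foldl pvStepA (acc, inside, []) =
      ((chunks.foldl pvStepB (acc, inside)).1, (chunks.foldl pvStepB (acc, inside)).2, []) := by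
  intro chunks
  induction chunks with
  | nil => intro acc inside; rfl
  | cons c cs ih =>
    intro acc inside
    by_cases hc : c.toList = []
    · have hA : pvStepA (acc, inside, []) c = (acc, inside, []) := by
        rw [pvStepA, if_pos hc]
      have hB : pvStepB (acc, inside) c = (acc, inside) := by
        rw [pvStepB]
        simp only [hc]
        rw [show pvLoopB [] 0 inside [] = ([], inside) by rw [pvLoopB]; simp]
        simp
      simp only [List.foldl_cons, hA, hB]
      exact ih acc inside
    · have hloop : pvLoopA c.toList 0 inside [] = pvLoopB c.toList 0 inside [] :=
        pv_loop_eq c.toList.length c.toList 0 inside [] (by omega)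
      set r := pvLoopB c.toList 0 inside [] with hr
      have hA : pvStepA (acc, inside, []) c =
          (acc ++ (if r.1 = [] then [] else [String.ofList r.1]), r.2, []) := by
        rw [pvStepA, if_neg hc]
        simp only [hloop]
        by_cases h1 : r.1 = []
        · rw [if_pos h1]; simp [h1]
        · rw [if_neg h1]; simp [h1]
      have hB : pvStepB (acc, inside) c =
          (acc ++ (if r.1 = [] then [] else [String.ofList r.1]), r.2) := by
        rw [pvStepB]
      simp only [List.foldl_cons, hA, hB]
      exact ih _ r.2

-- ===== VERDICT (by name: the statement is the Claim_ definition above) =====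
theorem delete_think_stream_spec : Claim_equal_delete_think_stream := by
  intro chunks _
  unfold Spec_delete_think_stream delete_think_stream delete_think_stream_alt
  rw [pv_fold_eq chunks [] false]
  simp
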